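-- pv_equiv track=rewrite | github.com/Jenway/CS61A | homework/hw03/parsons_probs/neighbor_digits.py | neighbor_digits
-- ===== SOURCE A (Python) =====
-- def neighbor_digits(num, prev_digit=-1):
--     """
--     Returns the number of digits in num that have the same digit to its right
--     or left.
--     >>> neighbor_digits(111)
--     3
--     >>> neighbor_digits(123)
--     0
--     >>> neighbor_digits(112)
--     2
--     >>> neighbor_digits(1122)
--     4
--     """
--     "*** YOUR CODE HERE ***"
--     if num  < 10:
--         return 1 if prev_digit == num else 0
--     else:
--         if num % 10 == ((num //10) %10) or num % 10 == prev_digit: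
--             return 1 + neighbor_digits(num // 10,num %10)
--         else:
--             return 0 + neighbor_digits(num // 10,num %10)
-- ===== SOURCE B (Python) =====
-- def neighbor_digits(num, prev_digit=-1):
--     count = 0
--     while num >= 10:
--         last = num % 10
--         if last == (num // 10) % 10 or last == prev_digit:
--             count += 1
--         prev_digit = last
--         num //= 10
--     return count + (1 if prev_digit == num else 0)
-- ===== Notes on version B (the rewrite author's own statement) =====
-- stated objective: alternative
-- what changed: Replaced A's plain recursion with an iterative while-loop keeping an explicit count accumulator and prev_digit state, using the same integer arithmetic.
import Mathlib
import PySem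

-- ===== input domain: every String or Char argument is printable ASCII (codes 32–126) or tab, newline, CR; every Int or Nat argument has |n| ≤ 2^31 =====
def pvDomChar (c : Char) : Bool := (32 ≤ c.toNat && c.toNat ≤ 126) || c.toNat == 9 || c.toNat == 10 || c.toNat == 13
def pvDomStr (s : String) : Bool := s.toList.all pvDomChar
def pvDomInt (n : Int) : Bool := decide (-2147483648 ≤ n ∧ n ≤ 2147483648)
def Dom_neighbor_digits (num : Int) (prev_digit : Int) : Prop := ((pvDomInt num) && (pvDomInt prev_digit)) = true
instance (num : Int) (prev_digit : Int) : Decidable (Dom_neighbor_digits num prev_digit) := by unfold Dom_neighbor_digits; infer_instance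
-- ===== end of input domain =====

-- B replaces A's plain recursion by an iterative accumulator loop (same digit arithmetic); objective: alternative decomposition.


-- ===== PORT A =====
def neighbor_digits (num : Int) (prev_digit : Int) : Int :=
  if num < 10 then
    if prev_digit = num then 1 else 0
  else
    if PySem.Int.mod num 10 = PySem.Int.mod (PySem.Int.floordiv num 10) 10 ∨
       PySem.Int.mod num 10 = prev_digit then
      1 + neighbor_digits (PySem.Int.floordiv num 10) (PySem.Int.mod num 10)
    else
      0 + neighbor_digits (PySem.Int.floordiv num 10) (PySem.Int.mod num 10)
termination_by num.toNat
decreasing_by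
  all_goals
    rw [PySem.Int.floordiv_eq_ediv_of_pos (by norm_num)]
    omega

-- ===== PORT B =====
-- the while-loop of Source B, state (num, prev_digit, count)
def ndLoop (num : Int) (prev_digit : Int) (count : Int) : Int :=
  if num ≥ 10 then
    let last := PySem.Int.mod num 10
    let count' := if last = PySem.Int.mod (PySem.Int.floordiv num 10) 10 ∨ last = prev_digit
                  then count + 1 else count
    ndLoop (PySem.Int.floordiv num 10) last count'
  else
    count + (if prev_digit = num then 1 else 0)
termination_by num.toNat
decreasing_by
    rw [PySem.Int.floordiv_eq_ediv_of_pos (by norm_num)]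
    omega

def neighbor_digits_alt (num : Int) (prev_digit : Int) : Int :=
  ndLoop num prev_digit 0

-- ===== PRECONDITION & SPEC =====
def Spec_neighbor_digits (num : Int) (prev_digit : Int) (out : Int) : Prop := out = neighbor_digits_alt num prev_digit
instance (num : Int) (prev_digit : Int) (out : Int) : Decidable (Spec_neighbor_digits num prev_digit out) := by unfold Spec_neighbor_digits; infer_instance

-- ===== CLAIM (what is proved, stated in full; the proofs are below) =====
def Claim_equal_neighbor_digits : Prop := ∀ (num : Int) (prev_digit : Int), Dom_neighbor_digits num prev_digit → Spec_neighbor_digits num prev_digit (neighbor_digits num prev_digit)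

-- ===== LEMMAS AND PROOFS =====

-- loop invariant: the accumulator just shifts A's result
theorem ndLoop_eq (num prev_digit count : Int) :
    ndLoop num prev_digit count = count + neighbor_digits num prev_digit := by
  fun_induction ndLoop num prev_digit count with
  | case1 num prev_digit count h last count' ih =>
      conv_rhs => rw [neighbor_digits]
      rw [ih]
      simp only [count', last]
      simp only [if_neg (show ¬ num < 10 by omega)]
      split_ifs with hc <;> ring
  | case2 num prev_digit count h =>
      rw [neighbor_digits]
      simp only [if_pos (show num < 10 by omega)]

-- ===== VERDICT (by name: the statement is the Claim_ definition above) =====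
theorem neighbor_digits_spec : Claim_equal_neighbor_digits := by
  intro num prev_digit _
  unfold Spec_neighbor_digits neighbor_digits_alt
  rw [ndLoop_eq]
  ring
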